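-- pv_equiv track=rewrite | github.com/Lenchik16/Educational-project | add_program_to_undergraduate.py | parse_min_scores
-- ===== SOURCE A (Python) =====
-- def parse_min_scores(lines):
--     """
--     Парсит минимальные баллы ЕГЭ.
--     """
--     scores = []
--     for raw_line in lines:
--         line = raw_line.strip()
--         if ':' in line:
--             subject, score = line.split(':', 1)
--             subject = subject.strip()
--             score = score.strip()
--             if score.isdigit():
--                 scores.append((subject, int(score)))
--     if not scores:
--         return []
--     if len(scores) == 1:
--         return [(scores[0][0], scores[0][1], 1)]
--     result = []
--     result.append((scores[0][0], scores[0][1], 1))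
--     for subj, sc in scores[1:-1]:
--         result.append((subj, sc, 0))
--     result.append((scores[-1][0], scores[-1][1], 1))
--     return result
-- ===== SOURCE B (Python) =====
-- def parse_min_scores(lines):
--     # Back-to-front single pass: scan the lines in reverse, appending each
--     # parsed entry with flag 1 only when nothing parseable was seen yet
--     # (i.e. it is the LAST entry of the final result); reverse the built
--     # list, then promote the head's flag to 1 (the FIRST entry).
--     def parse(raw):
--         line = raw.strip()
--         if ':' not in line:
--             return None
--         subject, score = line.split(':', 1)
--         score = score.strip()
--         if not score.isdigit():
--             return None
--         return (subject.strip(), int(score))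
--
--     out = []
--     for raw in reversed(lines):
--         t = parse(raw)
--         if t is not None:
--             out.append((t[0], t[1], 1 if not out else 0))
--     out.reverse()
--     if out:
--         out[0] = (out[0][0], out[0][1], 1)
--     return out
-- ===== Notes on version B (the rewrite author's own statement) =====
-- stated objective: alternative
-- what changed: A stages the work forwards (collect a scores list, branch on its length, then flag via first-append / middle-slice loop / last-append); B never builds a scores list: it scans the lines BACK-TO-FRONT, emitting each parsed entry immediately with the last-entry flag decided by whether the accumulator is still empty, then reverses and promotes the head flag.
import Mathlib
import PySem

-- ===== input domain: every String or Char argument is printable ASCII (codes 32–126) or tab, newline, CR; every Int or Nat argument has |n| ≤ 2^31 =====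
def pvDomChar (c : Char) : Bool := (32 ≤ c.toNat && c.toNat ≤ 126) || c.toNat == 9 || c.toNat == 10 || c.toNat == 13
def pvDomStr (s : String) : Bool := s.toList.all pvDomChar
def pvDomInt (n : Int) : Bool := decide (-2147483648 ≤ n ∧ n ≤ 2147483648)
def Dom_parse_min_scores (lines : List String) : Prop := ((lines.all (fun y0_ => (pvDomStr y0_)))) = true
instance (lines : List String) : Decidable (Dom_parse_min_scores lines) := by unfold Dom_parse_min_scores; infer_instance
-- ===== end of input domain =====

-- B replaces A's staged forward algorithm (collect scores list, branch on length,
-- flag via first-append / middle-slice loop / last-append) by one back-to-front pass: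
-- parsed entries are emitted at once while scanning reversed(lines), the last-entry
-- flag decided by accumulator emptiness; then reverse and promote the head flag.

-- ===== PORT A =====
-- Literal port of A. `int(score)` is total here because score.isdigit() holds; the
-- `.getD 0` default is unreachable (ofStr? succeeds on a nonempty digit string).
def parse_min_scores (lines : List String) : List (String × Int × Int) :=
  let scores : List (String × Int) := lines.foldl (fun scores raw_line =>
    let line := PySem.Str.strip raw_line
    if PySem.Str.isIn ":" line then
      match PySem.Str.splitMax? line ":" 1 with
      | some (subject :: score :: _) =>
        let subject := PySem.Str.strip subject
        let score := PySem.Str.strip score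
        if PySem.Str.strIsdigit score then
          scores ++ [(subject, (PySem.Int.ofStr? score).getD 0)]
        else scores
      | _ => scores   -- unreachable: ':' in line guarantees two pieces
    else scores) []
  if scores.isEmpty then []
  else if scores.length == 1 then
    [((PySem.List.pyGetD scores 0 ("", 0)).1, (PySem.List.pyGetD scores 0 ("", 0)).2, 1)]
  else
    let result : List (String × Int × Int) :=
      [((PySem.List.pyGetD scores 0 ("", 0)).1, (PySem.List.pyGetD scores 0 ("", 0)).2, 1)]
    let result := (PySem.List.slice scores (some 1) (some (-1))).foldl
      (fun result p => result ++ [(p.1, p.2, 0)]) result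
    result ++ [((PySem.List.pyGetD scores (-1) ("", 0)).1, (PySem.List.pyGetD scores (-1) ("", 0)).2, 1)]

-- ===== PORT B =====
-- Source B's `parse` helper: one line → Option (subject, score).
def pvParse (raw_line : String) : Option (String × Int) :=
  let line := PySem.Str.strip raw_line
  if !(PySem.Str.isIn ":" line) then none
  else
    match PySem.Str.splitMax? line ":" 1 with
    | none => none
    | some parts =>
      match parts with
      | [] => none   -- unreachable: ':' in line guarantees two pieces
      | subject :: rest =>
        match rest with
        | [] => none   -- unreachable: ':' in line guarantees two pieces
        | score :: _ =>
          let score := PySem.Str.strip score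
          if !(PySem.Str.strIsdigit score) then none
          else some (PySem.Str.strip subject, (PySem.Int.ofStr? score).getD 0)

def parse_min_scores_alt (lines : List String) : List (String × Int × Int) :=
  let out : List (String × Int × Int) := lines.reverse.foldl (fun out raw =>
    match pvParse raw with
    | none => out
    | some t => out ++ [(t.1, t.2, if out.isEmpty then (1 : Int) else 0)]) []
  let out := out.reverse
  match out with
  | [] => []
  | first :: rest => (first.1, first.2.1, 1) :: rest

-- ===== PRECONDITION & SPEC =====
def Spec_parse_min_scores (lines : List String) (out : List (String × Int × Int)) : Prop := out = parse_min_scores_alt lines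
instance (lines : List String) (out : List (String × Int × Int)) : Decidable (Spec_parse_min_scores lines out) := by unfold Spec_parse_min_scores; infer_instance

-- ===== CLAIM (what is proved, stated in full; the proofs are below) =====
def Claim_equal_parse_min_scores : Prop := ∀ (lines : List String), Dom_parse_min_scores lines → Spec_parse_min_scores lines (parse_min_scores lines)

-- ===== LEMMAS AND PROOFS =====

-- The common denotation of both flag phases: flag from `first?` and tail emptiness.
def pvMark : List (String × Int) → Bool → List (String × Int × Int)
  | [], _ => []
  | x :: xs, b =>
    (x.1, x.2, if b || xs.isEmpty then (1 : Int) else 0) :: pvMark xs false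

-- zero-flag and last-flag images of a scores list
def pvZl (xs : List (String × Int)) : List (String × Int × Int) :=
  xs.map (fun p => (p.1, p.2, (0 : Int)))

def pvMf : List (String × Int) → List (String × Int × Int)
  | [] => []
  | x :: xs => (x.1, x.2, (1 : Int)) :: pvZl xs

-- B's reversed-scan loop: first parsed entry gets flag 1 iff the accumulator started empty.
lemma pv_revloop (l : List String) (acc : List (String × Int × Int)) :
    l.foldl (fun out raw =>
      match pvParse raw with
      | none => out
      | some t => out ++ [(t.1, t.2, if out.isEmpty then (1 : Int) else 0)]) acc
    = acc ++ (if acc.isEmpty then pvMf (l.filterMap pvParse) else pvZl (l.filterMap pvParse)) := by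
  induction l generalizing acc with
  | nil => cases acc <;> simp [pvMf, pvZl]
  | cons r rest ih =>
    rw [List.foldl_cons]
    rcases h : pvParse r with _ | t
    · rw [ih, List.filterMap_cons_none h]
    · rw [ih, List.filterMap_cons_some h]
      cases acc <;> simp [pvMf, pvZl]

set_option maxHeartbeats 1000000 in
lemma pv_step_eq :
    (fun (scores : List (String × Int)) (raw_line : String) =>
      let line := PySem.Str.strip raw_line
      if PySem.Str.isIn ":" line then
        match PySem.Str.splitMax? line ":" 1 with
        | some (subject :: score :: _) =>
          let subject := PySem.Str.strip subject
          let score := PySem.Str.strip score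
          if PySem.Str.strIsdigit score then
            scores ++ [(subject, (PySem.Int.ofStr? score).getD 0)]
          else scores
        | _ => scores
      else scores)
    = (fun scores raw_line => scores ++ (pvParse raw_line).toList) := by
  funext scores raw_line
  show (if PySem.Str.isIn ":" (PySem.Str.strip raw_line) then _ else _) = _
  unfold pvParse
  by_cases h : PySem.Str.isIn ":" (PySem.Str.strip raw_line) = true
  · rw [if_pos h]
    simp only [h, Bool.not_true, Bool.false_eq_true, if_false]
    rcases hsp : PySem.Str.splitMax? (PySem.Str.strip raw_line) ":" 1 with _ | ⟨_ | ⟨a, _ | ⟨b, t⟩⟩⟩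
    · simp
    · simp
    · simp
    · by_cases hd : PySem.Str.strIsdigit (PySem.Str.strip b) = true
      · simp only [hd, Bool.not_true, Bool.false_eq_true, if_false]
        simp
      · simp only [Bool.not_eq_true] at hd
        simp only [hd, Bool.not_false, if_true, Bool.false_eq_true, if_false]
        simp
  · simp only [Bool.not_eq_true] at h
    have h' : (!PySem.Str.isIn ":" (PySem.Str.strip raw_line)) = true := by rw [h]; rfl
    rw [if_neg (by rw [h]; decide), if_pos h']
    simp

lemma pv_fold_filterMap {α β : Type} (g : α → Option β) (l : List α) (acc : List β) :
    l.foldl (fun acc x => acc ++ (g x).toList) acc = acc ++ l.filterMap g := by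
  induction l generalizing acc with
  | nil => simp
  | cons x xs ih =>
    rw [List.foldl_cons, ih]
    rcases h : g x with _ | b <;> simp [h]

lemma pvMark_last (ys : List (String × Int)) (z : String × Int) :
    pvMark (ys ++ [z]) false
      = ys.map (fun p => (p.1, p.2, (0 : Int))) ++ [(z.1, z.2, 1)] := by
  induction ys with
  | nil => simp [pvMark]
  | cons y ys ih =>
    simp [pvMark, ih]

-- A's flag phase, as a function of the collected scores, equals pvMark … true.
lemma pv_flags (scores : List (String × Int)) :
    (if scores.isEmpty then ([] : List (String × Int × Int))
     else if scores.length == 1 then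
       [((PySem.List.pyGetD scores 0 ("", 0)).1, (PySem.List.pyGetD scores 0 ("", 0)).2, 1)]
     else
       let result : List (String × Int × Int) :=
         [((PySem.List.pyGetD scores 0 ("", 0)).1, (PySem.List.pyGetD scores 0 ("", 0)).2, 1)]
       let result := (PySem.List.slice scores (some 1) (some (-1))).foldl
         (fun result p => result ++ [(p.1, p.2, 0)]) result
       result ++ [((PySem.List.pyGetD scores (-1) ("", 0)).1, (PySem.List.pyGetD scores (-1) ("", 0)).2, 1)])
    = pvMark scores true := by
  match scores with
  | [] => rfl
  | [x] => simp [pvMark, PySem.List.pyGetD_ofNat']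
  | x :: y :: rest =>
    obtain ⟨ys, z, hz⟩ : ∃ ys z, y :: rest = ys ++ [z] :=
      ⟨(y :: rest).dropLast, (y :: rest).getLast (by simp),
        (List.dropLast_append_getLast (by simp)).symm⟩
    rw [hz, show x :: (ys ++ [z]) = (x :: ys) ++ [z] from rfl]
    have hget0 : PySem.List.pyGetD ((x :: ys) ++ [z]) 0 ("", 0) = x := by
      simp [PySem.List.pyGetD_ofNat']
    have hgetm1 : PySem.List.pyGetD ((x :: ys) ++ [z]) (-1) ("", 0) = z := by
      simp [PySem.List.pyGetD, PySem.List.pyGet?, PySem.List.pyIdx?]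
    have hslice : PySem.List.slice ((x :: ys) ++ [z]) (some 1) (some (-1)) = ys := by
      simp [PySem.List.slice, PySem.List.clampIdx]
      rw [if_neg (by omega)]
      simp
    rw [if_neg (by simp), if_neg (by simp)]
    simp only [hget0, hgetm1, hslice]
    rw [PySem.List.foldl_append_singleton_eq_map]
    show _ = pvMark (x :: (ys ++ [z])) true
    rw [pvMark, pvMark_last]
    simp

-- B's whole pipeline (reversed scan, reverse, head patch) also denotes pvMark … true.
lemma pv_alt_mark (xs : List (String × Int)) :
    (match (pvMf xs.reverse).reverse with
     | [] => ([] : List (String × Int × Int))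
     | first :: rest => (first.1, first.2.1, 1) :: rest) = pvMark xs true := by
  match xs with
  | [] => rfl
  | x :: xs' =>
    obtain ⟨ys, z, hz⟩ : ∃ ys z, x :: xs' = ys ++ [z] :=
      ⟨(x :: xs').dropLast, (x :: xs').getLast (by simp),
        (List.dropLast_append_getLast (by simp)).symm⟩
    rw [hz]
    have h1 : (pvMf ((ys ++ [z]).reverse)).reverse = pvZl ys ++ [(z.1, z.2, 1)] := by
      rw [List.reverse_append, List.reverse_singleton, List.singleton_append, pvMf]
      simp [pvZl, List.map_reverse]
    rw [h1]
    cases ys with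
    | nil => simp [pvZl, pvMark]
    | cons y ys' =>
      simp only [pvZl, List.map_cons, List.cons_append]
      rw [List.cons_append] at *
      show (y.1, y.2, 1) :: _ = pvMark (y :: (ys' ++ [z])) true
      rw [pvMark, pvMark_last]
      simp

-- ===== VERDICT (by name: the statement is the Claim_ definition above) =====
theorem parse_min_scores_spec : Claim_equal_parse_min_scores := by
  intro lines _
  show parse_min_scores lines = parse_min_scores_alt lines
  simp only [parse_min_scores, parse_min_scores_alt]
  rw [pv_step_eq, pv_fold_filterMap]
  simp only [List.nil_append]
  rw [pv_flags, pv_revloop]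
  simp only [List.isEmpty_nil, if_true, List.nil_append, List.filterMap_reverse]
  exact (pv_alt_mark _).symm
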